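-- pv_equiv track=rewrite | github.com/sumitmalhotra-blip/Biovaram_Ev_Analysis_ReactUI | backend/src/fcs_calibration.py | find_scatter_channels
-- ===== SOURCE A (Python) =====
-- from typing import Optional, Dict, List, Tuple, Union
--
-- def find_scatter_channels(channels: List[str]) -> Dict[str, str]:
--     """
--     Find the appropriate scatter channels in an FCS file
--
--     Different instruments use different naming conventions:
--     - Nano Vis: FSC-H, SSC-H, SSC_1-H, etc.
--     - PC3: VSSC1-H, BSSC1-H, etc.
--     - HEK TFF (NanoFCM): Has 'Size' column directly (no scatter channels)
--
--     Returns dict mapping standard names to actual channel names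
--     """
--     channel_map = {}
--
--     # Check if this is NanoFCM format with direct Size measurement
--     for ch in channels:
--         if ch.upper() == 'SIZE':
--             channel_map['size_direct'] = ch
--             return channel_map  # No scatter channels needed
--
--     # Forward scatter
--     for ch in channels:
--         if 'FSC-H' in ch.upper() or 'FSC_H' in ch.upper():
--             channel_map['fsc'] = ch
--             break
--
--     # Side scatter - prefer SSC-H, fallback to VSSC or SSC_1
--     ssc_candidates = ['SSC-H', 'SSC_H', 'VSSC1-H', 'VSSC-H', 'SSC_1-H']
--     for candidate in ssc_candidates:
--         for ch in channels:
--             if candidate.upper() in ch.upper():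
--                 channel_map['ssc'] = ch
--                 break
--         if 'ssc' in channel_map:
--             break
--
--     # If no specific match, look for any SSC
--     if 'ssc' not in channel_map:
--         for ch in channels:
--             if 'SSC' in ch.upper() and '-H' in ch.upper():
--                 channel_map['ssc'] = ch
--                 break
--
--     return channel_map
-- ===== SOURCE B (Python) =====
-- def find_scatter_channels(channels):
--     """
--     Find the appropriate scatter channels in an FCS file.
--     Returns dict mapping standard names to actual channel names.
--     """
--     size = next((ch for ch in channels if ch.upper() == 'SIZE'), None)
--     if size is not None:
--         return {'size_direct': size}
--
--     channel_map = {}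
--
--     fsc = next((ch for ch in channels
--                 if 'FSC-H' in ch.upper() or 'FSC_H' in ch.upper()), None)
--     if fsc is not None:
--         channel_map['fsc'] = fsc
--
--     # One pass over channels: keep the channel with the lowest-ranked matching
--     # SSC candidate; strict '<' lets the earliest channel win rank ties.
--     candidates = ['SSC-H', 'SSC_H', 'VSSC1-H', 'VSSC-H', 'SSC_1-H']
--     best = None  # (candidate_rank, channel)
--     for ch in channels:
--         u = ch.upper()
--         rank = next((j for j, cand in enumerate(candidates) if cand in u), None)
--         if rank is not None and (best is None or rank < best[0]):
--             best = (rank, ch)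
--     if best is not None:
--         channel_map['ssc'] = best[1]
--     else:
--         fallback = next((ch for ch in channels
--                          if 'SSC' in ch.upper() and '-H' in ch.upper()), None)
--         if fallback is not None:
--             channel_map['ssc'] = fallback
--     return channel_map
-- ===== Notes on version B (the rewrite author's own statement) =====
-- stated objective: alternative
-- what changed: The SSC selection's candidate-major nested loops (scan all channels once per candidate, up to 5 passes) are replaced by a single channel-major pass keeping the channel with the lowest-ranked matching candidate (strict < so the earliest channel wins rank ties), and the three first-match loops become next(...) generator expressions.
import Mathlib
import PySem

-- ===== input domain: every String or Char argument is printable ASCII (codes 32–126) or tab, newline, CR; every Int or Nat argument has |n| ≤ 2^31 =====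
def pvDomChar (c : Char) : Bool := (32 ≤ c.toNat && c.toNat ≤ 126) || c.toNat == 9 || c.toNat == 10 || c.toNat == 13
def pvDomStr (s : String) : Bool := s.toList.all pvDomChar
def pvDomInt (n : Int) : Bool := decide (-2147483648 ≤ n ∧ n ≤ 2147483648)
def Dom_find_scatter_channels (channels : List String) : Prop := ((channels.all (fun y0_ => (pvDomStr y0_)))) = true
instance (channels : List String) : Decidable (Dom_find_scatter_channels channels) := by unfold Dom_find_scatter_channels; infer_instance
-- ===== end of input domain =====

-- B replaces A's candidate-major nested SSC loops by a single channel-major pass keeping the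
-- lowest-ranked matching candidate (earliest channel wins rank ties); objective: alternative.

-- ===== PORT A =====
-- A's three first-match loops share one helper (each Python loop 'for ch: if p: assign; break')
def pvA_find (p : String → Bool) : List String → Option String
  | [] => none
  | ch :: rest => if p ch then some ch else pvA_find p rest

-- A's nested candidate loop: for candidate in ssc_candidates: for ch in channels: … break twice
def pvA_sscLoop : List String → List String → Option String
  | [], _ => none
  | cand :: cs, channels =>
    match pvA_find (fun ch => PySem.Str.isIn (PySem.Str.upper cand) (PySem.Str.upper ch)) channels with
    | some ch => some ch
    | none => pvA_sscLoop cs channels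

def find_scatter_channels (channels : List String) : List (String × String) :=
  match pvA_find (fun ch => PySem.Str.upper ch == "SIZE") channels with
  | some ch => [("size_direct", ch)]
  | none =>
    let m1 : List (String × String) :=
      match pvA_find (fun ch =>
          PySem.Str.isIn "FSC-H" (PySem.Str.upper ch) || PySem.Str.isIn "FSC_H" (PySem.Str.upper ch)) channels with
      | some ch => [("fsc", ch)]
      | none => []
    match pvA_sscLoop ["SSC-H", "SSC_H", "VSSC1-H", "VSSC-H", "SSC_1-H"] channels with
    | some ch => m1 ++ [("ssc", ch)]
    | none =>
      match pvA_find (fun ch =>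
          PySem.Str.isIn "SSC" (PySem.Str.upper ch) && PySem.Str.isIn "-H" (PySem.Str.upper ch)) channels with
      | some ch => m1 ++ [("ssc", ch)]
      | none => m1

-- ===== PORT B =====
-- rank = next((j for j, cand in enumerate(candidates) if cand in u), None)
def pvB_rank (cands : List (Int × String)) (u : String) : Option Int :=
  (cands.find? (fun jc => PySem.Str.isIn jc.2 u)).map (·.1)

-- loop body: if rank is not None and (best is None or rank < best[0]): best = (rank, ch)
def pvB_step (cands : List (Int × String)) (best : Option (Int × String)) (ch : String) : Option (Int × String) :=
  match pvB_rank cands (PySem.Str.upper ch) with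
  | none => best
  | some r =>
    match best with
    | none => some (r, ch)
    | some b => if r < b.1 then some (r, ch) else some b

def pvB_best (cands : List (Int × String)) (channels : List String) : Option (Int × String) :=
  channels.foldl (pvB_step cands) none

def find_scatter_channels_alt (channels : List String) : List (String × String) :=
  match channels.find? (fun ch => PySem.Str.upper ch == "SIZE") with
  | some ch => [("size_direct", ch)]
  | none =>
    let m1 : List (String × String) :=
      match channels.find? (fun ch =>
          PySem.Str.isIn "FSC-H" (PySem.Str.upper ch) || PySem.Str.isIn "FSC_H" (PySem.Str.upper ch)) with
      | some ch => [("fsc", ch)]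
      | none => []
    let cands := PySem.List.enumerate ["SSC-H", "SSC_H", "VSSC1-H", "VSSC-H", "SSC_1-H"]
    match pvB_best cands channels with
    | some b => m1 ++ [("ssc", b.2)]
    | none =>
      match channels.find? (fun ch =>
          PySem.Str.isIn "SSC" (PySem.Str.upper ch) && PySem.Str.isIn "-H" (PySem.Str.upper ch)) with
      | some ch => m1 ++ [("ssc", ch)]
      | none => m1

-- ===== PRECONDITION & SPEC =====
def Spec_find_scatter_channels (channels : List String) (out : List (String × String)) : Prop := out = find_scatter_channels_alt channels
instance (channels : List String) (out : List (String × String)) : Decidable (Spec_find_scatter_channels channels out) := by unfold Spec_find_scatter_channels; infer_instance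

-- ===== CLAIM (what is proved, stated in full; the proofs are below) =====
def Claim_equal_find_scatter_channels : Prop := ∀ (channels : List String), Dom_find_scatter_channels channels → Spec_find_scatter_channels channels (find_scatter_channels channels)

-- ===== LEMMAS AND PROOFS =====

theorem pvA_find_eq_find? (p : String → Bool) (l : List String) : pvA_find p l = l.find? p := by
  induction l with
  | nil => rfl
  | cons x xs ih => simp [pvA_find, List.find?_cons]; split <;> simp_all

-- enumerate with an arbitrary start, applied to the uppercased candidates
def pvEnumFrom : Int → List String → List (Int × String)
  | _, [] => []
  | k, c :: cs => (k, PySem.Str.upper c) :: pvEnumFrom (k + 1) cs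

theorem pvB_rank_lb (cs : List String) (k : Int) (u : String) (r : Int)
    (h : pvB_rank (pvEnumFrom k cs) u = some r) : k ≤ r := by
  induction cs generalizing k with
  | nil => simp [pvB_rank, pvEnumFrom] at h
  | cons c cs ih =>
    simp only [pvB_rank, pvEnumFrom, List.find?_cons] at h
    by_cases hc : PySem.Chars.isIn (PySem.Chars.upper c.toList) u.toList = true
    · simp [hc] at h
      omega
    · simp only [PySem.Str.isIn_eq, PySem.Str.toList_upper, hc] at h
      have := ih (k + 1) (by simpa [pvB_rank] using h)
      omega

theorem pvB_fold_nil_cands (channels : List String) (acc : Option (Int × String)) :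
    channels.foldl (pvB_step []) acc = acc := by
  induction channels generalizing acc with
  | nil => rfl
  | cons x xs ih => simpa [pvB_step, pvB_rank] using ih acc

theorem pvB_fold_skip (c : String) (k : Int) (cands : List (Int × String)) (channels : List String)
    (acc : Option (Int × String))
    (h : ∀ ch ∈ channels, PySem.Chars.isIn (PySem.Chars.upper c.toList) (PySem.Chars.upper ch.toList) = false) :
    channels.foldl (pvB_step ((k, PySem.Str.upper c) :: cands)) acc
      = channels.foldl (pvB_step cands) acc := by
  induction channels generalizing acc with
  | nil => rfl
  | cons x xs ih =>
    have hx := h x (by simp)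
    have hstep : pvB_step ((k, PySem.Str.upper c) :: cands) acc x = pvB_step cands acc x := by
      simp [pvB_step, pvB_rank, hx]
    simp only [List.foldl_cons, hstep]
    exact ih _ (fun ch hm => h ch (by simp [hm]))

theorem pvB_fold_keep (cands : List (Int × String)) (channels : List String) (b : Int) (x : String)
    (h : ∀ u r, pvB_rank cands u = some r → b ≤ r) :
    channels.foldl (pvB_step cands) (some (b, x)) = some (b, x) := by
  induction channels with
  | nil => rfl
  | cons ch chs ih =>
    have hstep : pvB_step cands (some (b, x)) ch = some (b, x) := by
      simp only [pvB_step]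
      cases hr : pvB_rank cands (PySem.Str.upper ch) with
      | none => rfl
      | some r =>
        have := h _ _ hr
        simp only []
        have : ¬ r < b := by omega
        simp [this]
    simp only [List.foldl_cons, hstep, ih]

theorem pvB_fold_lb (cs : List String) (k : Int) (channels : List String) (acc : Option (Int × String))
    (hacc : acc = none ∨ ∃ r x, acc = some (r, x) ∧ k ≤ r) :
    channels.foldl (pvB_step (pvEnumFrom k cs)) acc = none ∨
      ∃ r x, channels.foldl (pvB_step (pvEnumFrom k cs)) acc = some (r, x) ∧ k ≤ r := by
  induction channels generalizing acc with
  | nil => simpa using hacc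
  | cons ch chs ih =>
    simp only [List.foldl_cons]
    apply ih
    simp only [pvB_step]
    cases hr : pvB_rank (pvEnumFrom k cs) (PySem.Str.upper ch) with
    | none => exact hacc
    | some r =>
      have hkr := pvB_rank_lb cs k _ _ hr
      rcases hacc with h | ⟨r', x', h, hk⟩
      · subst h; right; exact ⟨r, ch, rfl, hkr⟩
      · subst h; right
        by_cases hlt : r < r'
        · exact ⟨r, ch, by simp [hlt], hkr⟩
        · exact ⟨r', x', by simp [hlt], hk⟩

-- key: A's candidate-major nested loop equals B's channel-major argmin pass
theorem pvKey (cs : List String) (k : Int) (channels : List String) :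
    pvA_sscLoop cs channels
      = (channels.foldl (pvB_step (pvEnumFrom k cs)) none).map Prod.snd := by
  induction cs generalizing k with
  | nil => simp [pvA_sscLoop, pvEnumFrom, pvB_fold_nil_cands]
  | cons c cs ih =>
    simp only [pvA_sscLoop, pvA_find_eq_find?, pvEnumFrom]
    cases hfind : channels.find? (fun ch => PySem.Str.isIn (PySem.Str.upper c) (PySem.Str.upper ch)) with
    | none =>
      have hall : ∀ ch ∈ channels,
          PySem.Chars.isIn (PySem.Chars.upper c.toList) (PySem.Chars.upper ch.toList) = false := by
        intro ch hm
        simpa using List.find?_eq_none.mp hfind ch hm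
      rw [pvB_fold_skip c k _ channels none hall]
      exact ih (k + 1)
    | some ch0 =>
      -- decompose channels at the first channel matching candidate c
      obtain ⟨pre, suf, hsplit, hpre⟩ :
          ∃ pre suf, channels = pre ++ ch0 :: suf ∧
            ∀ ch ∈ pre, PySem.Chars.isIn (PySem.Chars.upper c.toList) (PySem.Chars.upper ch.toList) = false := by
        obtain ⟨hp, pre, suf, heq, hall⟩ := List.find?_eq_some_iff_append.mp hfind
        exact ⟨pre, suf, heq, fun ch hm => by simpa using hall ch hm⟩
      have hch0 : PySem.Chars.isIn (PySem.Chars.upper c.toList) (PySem.Chars.upper ch0.toList) = true := by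
        simpa using List.find?_some hfind
      subst hsplit
      rw [List.foldl_append]
      rw [pvB_fold_skip c k _ pre none hpre]
      have hstep0 : pvB_step ((k, PySem.Str.upper c) :: pvEnumFrom (k + 1) cs)
          (pre.foldl (pvB_step (pvEnumFrom (k + 1) cs)) none) ch0 = some (k, ch0) := by
        rcases pvB_fold_lb cs (k + 1) pre none (Or.inl rfl) with h | ⟨r, x, h, hk⟩
        · simp [h, pvB_step, pvB_rank, hch0]
        · have hlt : k < r := by omega
          simp [h, pvB_step, pvB_rank, hch0, hlt]
      simp only [List.foldl_cons, hstep0]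
      have hkeep := pvB_fold_keep ((k, PySem.Str.upper c) :: pvEnumFrom (k + 1) cs) suf k ch0 (by
        intro u r hr
        simp only [pvB_rank, List.find?_cons] at hr
        by_cases hc : PySem.Chars.isIn (PySem.Chars.upper c.toList) u.toList = true
        · simp [hc] at hr
          omega
        · simp only [PySem.Str.isIn_eq, PySem.Str.toList_upper, hc] at hr
          have := pvB_rank_lb cs (k + 1) u r (by simpa [pvB_rank] using hr)
          omega)
      rw [hkeep]
      rfl

theorem pvEnum_concrete :
    PySem.List.enumerate ["SSC-H", "SSC_H", "VSSC1-H", "VSSC-H", "SSC_1-H"]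
      = pvEnumFrom 0 ["SSC-H", "SSC_H", "VSSC1-H", "VSSC-H", "SSC_1-H"] := by
  decide

-- ===== VERDICT (by name: the statement is the Claim_ definition above) =====
theorem find_scatter_channels_spec : Claim_equal_find_scatter_channels := by
  intro channels _
  unfold Spec_find_scatter_channels find_scatter_channels find_scatter_channels_alt
  simp only [pvA_find_eq_find?, pvB_best, pvEnum_concrete, pvKey _ 0 channels]
  cases (List.foldl (pvB_step (pvEnumFrom 0 ["SSC-H", "SSC_H", "VSSC1-H", "VSSC-H", "SSC_1-H"])) none channels) <;> rfl
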